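-- pv_equiv track=rewrite | github.com/ysinghal555/dsa | dsa_striver/08_Arrays/02_LogicBuilding/4. Union of two sorted arrays.py | unionArray
-- ===== SOURCE A (Python) =====
-- def unionArray(a1, a2):
--     res = set()
--     n1 = len(a1)
--     n2 = len(a2)
--
--     for i in range(n1):
--         res.add(a1[i])
--
--     for i in range(n2):
--         res.add(a2[i])
--
--     res = list(res)
--     res.sort()
--
--     return res
-- ===== SOURCE B (Python) =====
-- def unionArray(a1, a2):
--     xs = sorted(a1 + a2)
--     out = []
--     for x in xs:
--         if not out or out[-1] != x:
--             out.append(x)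
--     return out
-- ===== Notes on version B (the rewrite author's own statement) =====
-- stated objective: alternative
-- what changed: Replaces the hash-set accumulation followed by a sort with sorting the concatenation once and removing adjacent duplicates in a single linear scan (no set at all).
import Mathlib
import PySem

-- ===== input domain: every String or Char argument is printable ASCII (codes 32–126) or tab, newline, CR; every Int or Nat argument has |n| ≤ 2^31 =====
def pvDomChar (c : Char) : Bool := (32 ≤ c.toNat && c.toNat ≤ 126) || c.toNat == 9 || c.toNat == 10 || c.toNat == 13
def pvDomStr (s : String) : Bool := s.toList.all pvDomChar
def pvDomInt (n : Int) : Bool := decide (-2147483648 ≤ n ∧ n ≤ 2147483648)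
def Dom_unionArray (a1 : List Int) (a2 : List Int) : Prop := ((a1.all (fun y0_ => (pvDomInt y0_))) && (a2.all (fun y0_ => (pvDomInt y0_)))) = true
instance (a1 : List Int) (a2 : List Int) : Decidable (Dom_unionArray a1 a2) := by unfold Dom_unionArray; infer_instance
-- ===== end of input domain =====

-- B replaces A's hash-set accumulation + sort by one sort of the concatenation followed by a
-- linear adjacent-duplicate scan (alternative algorithm, same asymptotic cost, no set needed).

-- ===== PORT A =====
-- res = set(); add a1[i] for i in range(n1); add a2[i] for i in range(n2); res = sorted(list(res))
def unionArray (a1 : List Int) (a2 : List Int) : List Int :=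
  let res : PySem.Set Int := PySem.Set.empty
  let n1 : Int := PySem.List.len a1
  let n2 : Int := PySem.List.len a2
  let res := (PySem.List.pyRange 0 n1 1).foldl
    (fun r i => PySem.Set.add r (PySem.List.pyGetD a1 i 0)) res
  let res := (PySem.List.pyRange 0 n2 1).foldl
    (fun r i => PySem.Set.add r (PySem.List.pyGetD a2 i 0)) res
  PySem.List.sorted res (fun x => x) false

-- ===== PORT B =====
-- xs = sorted(a1 + a2); out = []; for x in xs: if not out or out[-1] != x: out.append(x)
def unionArray_alt (a1 : List Int) (a2 : List Int) : List Int :=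
  let xs := PySem.List.sorted (a1 ++ a2) (fun x => x) false
  xs.foldl (fun out x => if out.getLast? = some x then out else out ++ [x]) []

-- ===== PRECONDITION & SPEC =====
def Spec_unionArray (a1 : List Int) (a2 : List Int) (out : List Int) : Prop := out = unionArray_alt a1 a2
instance (a1 : List Int) (a2 : List Int) (out : List Int) : Decidable (Spec_unionArray a1 a2 out) := by unfold Spec_unionArray; infer_instance

-- ===== CLAIM (what is proved, stated in full; the proofs are below) =====
def Claim_equal_unionArray : Prop := ∀ (a1 : List Int) (a2 : List Int), Dom_unionArray a1 a2 → Spec_unionArray a1 a2 (unionArray a1 a2)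

-- ===== LEMMAS AND PROOFS =====

-- In a strictly increasing list every element is ≤ the last one.
lemma le_getLast?_of_pairwise_lt {acc : List Int} {a l : Int}
    (h : acc.Pairwise (· < ·)) (ha : a ∈ acc) (hl : acc.getLast? = some l) : a ≤ l := by
  induction acc with
  | nil => simp at ha
  | cons x t ih =>
    rcases List.pairwise_cons.mp h with ⟨hx, ht⟩
    cases t with
    | nil =>
      simp at ha hl; omega
    | cons y u =>
      rw [List.getLast?_cons_cons] at hl
      rcases List.mem_cons.mp ha with rfl | hmem
      · have : l ∈ y :: u := List.mem_of_getLast? hl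
        exact le_of_lt (hx l this)
      · exact ih ht hmem hl

-- Invariant of B's scan loop over a ≤-sorted list.
lemma dedup_loop_spec (xs acc : List Int)
    (h1 : acc.Pairwise (· < ·))
    (h2 : xs.Pairwise (· ≤ ·))
    (h3 : ∀ a ∈ acc, ∀ b ∈ xs, a ≤ b) :
    (xs.foldl (fun out x => if out.getLast? = some x then out else out ++ [x]) acc).Pairwise (· < ·) ∧
    ∀ y, (y ∈ xs.foldl (fun out x => if out.getLast? = some x then out else out ++ [x]) acc ↔ y ∈ acc ∨ y ∈ xs) := by
  induction xs generalizing acc with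
  | nil => simpa using h1
  | cons x t ih =>
    rcases List.pairwise_cons.mp h2 with ⟨hx, ht⟩
    simp only [List.foldl_cons]
    by_cases hc : acc.getLast? = some x
    · rw [if_pos hc]
      have hxmem : x ∈ acc := List.mem_of_getLast? hc
      have := ih acc h1 ht (fun a ha b hb => h3 a ha b (List.mem_cons_of_mem _ hb))
      refine ⟨this.1, fun y => ?_⟩
      rw [this.2 y]
      constructor
      · rintro (h | h)
        · exact Or.inl h
        · exact Or.inr (List.mem_cons_of_mem _ h)
      · rintro (h | h)
        · exact Or.inl h
        · rcases List.mem_cons.mp h with rfl | h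
          · exact Or.inl hxmem
          · exact Or.inr h
    · rw [if_neg hc]
      have hlt : ∀ a ∈ acc, a < x := by
        intro a ha
        have hle : a ≤ x := h3 a ha x (List.mem_cons_self)
        rcases lt_or_eq_of_le hle with h | rfl
        · exact h
        · exfalso
          obtain ⟨l, hl⟩ : ∃ l, acc.getLast? = some l := by
            cases hgl : acc.getLast? with
            | none => rw [List.getLast?_eq_none_iff] at hgl; subst hgl; simp at ha
            | some l => exact ⟨l, rfl⟩
          have h1' : a ≤ l := le_getLast?_of_pairwise_lt h1 ha hl
          have h2' : l ≤ a := h3 l (List.mem_of_getLast? hl) a (List.mem_cons_self)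
          exact hc (by rw [hl]; congr 1; omega)
      have hp1 : (acc ++ [x]).Pairwise (· < ·) := by
        rw [List.pairwise_append]
        exact ⟨h1, List.pairwise_singleton _ _, fun a ha b hb => by
          rw [List.mem_singleton] at hb; subst hb; exact hlt a ha⟩
      have hp3 : ∀ a ∈ acc ++ [x], ∀ b ∈ t, a ≤ b := by
        intro a ha b hb
        rcases List.mem_append.mp ha with h | h
        · exact h3 a h b (List.mem_cons_of_mem _ hb)
        · rw [List.mem_singleton] at h; subst h; exact hx b hb
      have := ih (acc ++ [x]) hp1 ht hp3
      refine ⟨this.1, fun y => ?_⟩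
      rw [this.2 y]
      simp only [List.mem_append, List.mem_cons]
      tauto

-- A reduces to sorted(set(a1 ++ a2)).
lemma unionArray_eq_sorted_ofList (a1 a2 : List Int) :
    unionArray a1 a2 = PySem.List.sorted (PySem.Set.ofList (a1 ++ a2)) (fun x => x) false := by
  unfold unionArray
  simp only [PySem.List.len]
  rw [PySem.List.foldl_pyRange_zero_pyGetD', PySem.List.foldl_pyRange_zero_pyGetD']
  rw [PySem.Set.ofList_eq_foldl, ← List.foldl_append]
  rfl

theorem unionArray_eq_alt (a1 a2 : List Int) : unionArray a1 a2 = unionArray_alt a1 a2 := by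
  rw [unionArray_eq_sorted_ofList]
  unfold unionArray_alt
  have hsp : (PySem.List.sorted (a1 ++ a2) (fun x => x) false).Pairwise (· ≤ ·) :=
    PySem.List.sorted_pairwise (a1 ++ a2) (fun x => x)
  obtain ⟨hpair, hmem⟩ := dedup_loop_spec (PySem.List.sorted (a1 ++ a2) (fun x => x) false) []
    (List.Pairwise.nil) hsp (by simp)
  apply PySem.List.sorted_eq_of_perm_of_pairwise_lt
  · rw [List.perm_ext_iff_of_nodup (hpair.imp ne_of_lt) (PySem.Set.nodup_ofList _)]
    intro y
    rw [hmem y, PySem.Set.mem_ofList]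
    simp [PySem.List.mem_sorted]
  · exact hpair

-- ===== VERDICT (by name: the statement is the Claim_ definition above) =====
theorem unionArray_spec : Claim_equal_unionArray := by
  intro a1 a2 _
  unfold Spec_unionArray
  exact unionArray_eq_alt a1 a2
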